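-- pv_equiv track=rewrite | github.com/ThreeFDDI/AdventOfCode | 2021/3-2.py | bit_counter
-- ===== SOURCE A (Python) =====
-- def bit_counter(diag_logs, matched):
--
--     bit_counts = {}
--
--     for i in range(len(diag_logs[0])):
--         bit_counts[int(i)] = 0
--
--     for entry in diag_logs:
--         if entry.startswith(matched['most']):
--             for x in range(len(entry)):
--                 bit_counts[x] = bit_counts.get(x) + int(entry[x])
--
--     return bit_counts
-- ===== SOURCE B (Python) =====
-- def bit_counter(diag_logs, matched):
--     prefix = matched['most']
--     matching = [e for e in diag_logs if e.startswith(prefix)]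
--     return {i: sum(int(e[i]) for e in matching if i < len(e))
--             for i in range(len(diag_logs[0]))}
-- ===== Notes on version B (the rewrite author's own statement) =====
-- stated objective: idiomatic
-- what changed: A's row-major nested loop mutating a pre-initialized dict is replaced by a prefix-filter pass followed by a column-major dict comprehension that sums each bit position over the matching entries.
import Mathlib
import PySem

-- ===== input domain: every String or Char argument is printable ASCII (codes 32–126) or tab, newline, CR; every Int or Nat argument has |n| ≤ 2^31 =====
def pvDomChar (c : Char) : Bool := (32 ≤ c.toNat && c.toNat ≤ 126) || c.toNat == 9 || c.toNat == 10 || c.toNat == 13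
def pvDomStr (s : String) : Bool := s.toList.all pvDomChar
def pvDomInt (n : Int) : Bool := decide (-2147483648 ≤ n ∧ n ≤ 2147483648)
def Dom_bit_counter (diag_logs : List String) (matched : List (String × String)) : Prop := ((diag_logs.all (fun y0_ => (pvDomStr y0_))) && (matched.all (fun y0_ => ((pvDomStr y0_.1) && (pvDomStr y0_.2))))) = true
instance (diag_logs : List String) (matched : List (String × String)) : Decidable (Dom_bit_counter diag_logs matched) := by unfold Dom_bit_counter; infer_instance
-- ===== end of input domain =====

-- B replaces A's row-major nested loop over a pre-initialized dict by a prefix-filter pass plus a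
-- column-major comprehension over the bit positions (objective: idiomatic; same asymptotic cost).

-- ===== PORT A =====
-- int(e[i]) for a single character e[i]; Pre_ guarantees the parse succeeds on every index reached
def pyIntChar (e : String) (i : Int) : Int :=
  (PySem.Int.ofChars? [(PySem.Str.pyGet? e i).getD ' ']).getD 0

def bit_counter (diag_logs : List String) (matched : List (String × String)) : List (Int × Int) :=
  -- bit_counts = {}; for i in range(len(diag_logs[0])): bit_counts[int(i)] = 0
  let bc0 : PySem.Dict Int Int :=
    (PySem.List.pyRange 0 ((PySem.Str.len ((PySem.List.pyGet? diag_logs 0).getD "")) : Int) 1).foldl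
      (fun d i => d.insert i 0) PySem.Dict.empty
  -- matched['most']  (KeyError excluded by Pre_)
  let most := ((matched.find? (fun p => p.1 == "most")).map (·.2)).getD ""
  -- for entry in diag_logs: if entry.startswith(...): for x in range(len(entry)):
  --   bit_counts[x] = bit_counts.get(x) + int(entry[x])   (None + int excluded by Pre_: getD 0 only read off-Pre_)
  let bc := diag_logs.foldl (fun d entry =>
      if PySem.Str.startswith entry most then
        (PySem.List.pyRange 0 ((PySem.Str.len entry : Int)) 1).foldl
          (fun d x => d.insert x (d.getD x 0 + pyIntChar entry x)) d
      else d) bc0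
  bc.items

-- ===== PORT B =====
def bit_counter_alt (diag_logs : List String) (matched : List (String × String)) : List (Int × Int) :=
  let prefx := ((matched.find? (fun p => p.1 == "most")).map (·.2)).getD ""
  let matching := diag_logs.filter (fun e => PySem.Str.startswith e prefx)
  (PySem.List.pyRange 0 ((PySem.Str.len ((PySem.List.pyGet? diag_logs 0).getD "")) : Int) 1).map
    (fun i => (i, matching.foldl
      (fun s e => if i < (PySem.Str.len e : Int) then s + pyIntChar e i else s) 0))

-- ===== PRECONDITION & SPEC =====
-- Pre_ excludes exactly the inputs where A raises: empty diag_logs (IndexError), no 'most' key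
-- (KeyError), a matching entry with a non-digit character (ValueError from int on that char), or a
-- matching entry longer than diag_logs[0] (TypeError: None + int).
def Pre_bit_counter (diag_logs : List String) (matched : List (String × String)) : Prop :=
  diag_logs ≠ [] ∧ (matched.find? (fun p => p.1 == "most")).isSome ∧
  ∀ e ∈ diag_logs,
    PySem.Str.startswith e (((matched.find? (fun p => p.1 == "most")).map (·.2)).getD "") = true →
      e.toList.all (fun c => PySem.Chars.isdigit c) = true ∧
      PySem.Str.len e ≤ PySem.Str.len (diag_logs.headD "")
instance (diag_logs : List String) (matched : List (String × String)) : Decidable (Pre_bit_counter diag_logs matched) := by unfold Pre_bit_counter; infer_instance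

def pvWitness_bit_counter : List String × (List (String × String)) :=
  (["10", "11", "01"], [("most", "1")])

def Spec_bit_counter (diag_logs : List String) (matched : List (String × String)) (out : List (Int × Int)) : Prop := out = bit_counter_alt diag_logs matched
instance (diag_logs : List String) (matched : List (String × String)) (out : List (Int × Int)) : Decidable (Spec_bit_counter diag_logs matched out) := by unfold Spec_bit_counter; infer_instance

-- ===== CLAIM (what is proved, stated in full; the proofs are below) =====
def Claim_equal_bit_counter : Prop := ∀ (diag_logs : List String) (matched : List (String × String)), Dom_bit_counter diag_logs matched → Pre_bit_counter diag_logs matched → Spec_bit_counter diag_logs matched (bit_counter diag_logs matched)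

-- ===== LEMMAS AND PROOFS =====

-- a conditional accumulation loop as a sum (used for both programs' per-column totals)
theorem foldl_ite_add {α : Type} (c : α → Prop) [DecidablePred c] (g : α → Int) :
    ∀ (l : List α) (a : Int),
      l.foldl (fun s e => if c e then s + g e else s) a
        = a + (l.map (fun e => if c e then g e else 0)).sum := by
  intro l
  induction l with
  | nil => intro a; simp
  | cons x l ih =>
    intro a
    simp only [List.foldl_cons, List.map_cons, List.sum_cons, ih]
    split_ifs <;> ring

-- inner loop of A: lookup after the per-entry update loop (keys of l pairwise distinct)
theorem inner_getD (e : String) (j : Int) :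
    ∀ (l : List Int), l.Nodup → ∀ (d : PySem.Dict Int Int),
      ((l.foldl (fun d x => d.insert x (d.getD x 0 + pyIntChar e x)) d).getD j 0)
        = d.getD j 0 + (if j ∈ l then pyIntChar e j else 0) := by
  intro l
  induction l with
  | nil => intro _ d; simp
  | cons x l ih =>
    intro hnd d
    rcases List.nodup_cons.mp hnd with ⟨hx, hnd'⟩
    simp only [List.foldl_cons]
    rw [ih hnd', PySem.Dict.getD_insert]
    by_cases hj : j = x
    · subst hj; simp [hx]
    · simp only [hj, if_false, List.mem_cons]
      by_cases hjl : j ∈ l <;> simp [hjl]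

-- inner loop of A: keys unchanged when every updated key is already present
theorem inner_keys (e : String) :
    ∀ (l : List Int) (d : PySem.Dict Int Int), (∀ x ∈ l, x ∈ d.keys) →
      (l.foldl (fun d x => d.insert x (d.getD x 0 + pyIntChar e x)) d).keys = d.keys := by
  intro l
  induction l with
  | nil => intro d _; simp
  | cons x l ih =>
    intro d h
    simp only [List.foldl_cons]
    have hx : x ∈ d.keys := h x List.mem_cons_self
    have hkeys : (d.insert x (d.getD x 0 + pyIntChar e x)).keys = d.keys :=
      PySem.Dict.keys_insert_of_contains d _ ((PySem.Dict.contains_iff_mem_keys d x).mpr hx)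
    rw [ih _ (by intro y hy; rw [hkeys]; exact h y (List.mem_cons_of_mem _ hy)), hkeys]

-- outer loop of A: keys and per-key lookup after folding over the entries
theorem outer_loop (most : String) (K : List Int) (j : Int)
    (hK : ∀ x : Int, x ∈ K ↔ 0 ≤ x ∧ x < (K.length : Int)) :
    ∀ (entries : List String) (d : PySem.Dict Int Int), d.keys = K →
      (∀ e ∈ entries, PySem.Str.startswith e most = true → (PySem.Str.len e : Int) ≤ (K.length : Int)) →
      (entries.foldl (fun d entry =>
          if PySem.Str.startswith entry most then
            (PySem.List.pyRange 0 ((PySem.Str.len entry : Int)) 1).foldl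
              (fun d x => d.insert x (d.getD x 0 + pyIntChar entry x)) d
          else d) d).keys = K ∧
      (entries.foldl (fun d entry =>
          if PySem.Str.startswith entry most then
            (PySem.List.pyRange 0 ((PySem.Str.len entry : Int)) 1).foldl
              (fun d x => d.insert x (d.getD x 0 + pyIntChar entry x)) d
          else d) d).getD j 0
        = d.getD j 0 + ((entries.filter (fun e => PySem.Str.startswith e most)).map
            (fun e => if j ∈ PySem.List.pyRange 0 ((PySem.Str.len e : Int)) 1
                      then pyIntChar e j else 0)).sum := by
  intro entries
  induction entries with
  | nil => intro d hd _; simpa using hd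
  | cons e entries ih =>
    intro d hd hlen
    by_cases hm : PySem.Str.startswith e most = true
    · have hsub : ∀ x ∈ PySem.List.pyRange 0 ((PySem.Str.len e : Int)) 1, x ∈ d.keys := by
        intro x hx
        rw [hd]
        rcases (PySem.List.mem_pyRange_one).mp hx with ⟨h0, h1⟩
        exact (hK x).mpr ⟨h0, lt_of_lt_of_le h1 (hlen e List.mem_cons_self hm)⟩
      have hkeys := inner_keys e _ d hsub
      have hgd := inner_getD e j _ (PySem.List.nodup_pyRange_one 0 ((PySem.Str.len e : Int))) d
      rcases ih _ (by rw [hkeys, hd]) (fun e' he' hm' => hlen e' (List.mem_cons_of_mem _ he') hm')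
        with ⟨hk2, hg2⟩
      simp only [List.foldl_cons, hm, if_true]
      rw [List.filter_cons_of_pos (by exact hm), List.map_cons, List.sum_cons]
      exact ⟨hk2, by rw [hg2, hgd]; ring⟩
    · simp only [List.foldl_cons, hm, if_false, Bool.false_eq_true]
      rw [List.filter_cons_of_neg (by exact hm)]
      exact ih _ hd (fun e' he' hm' => hlen e' (List.mem_cons_of_mem _ he') hm')

-- initialisation loop of A: its items and the all-zero lookups
theorem bc0_items (W : Int) :
    ((PySem.List.pyRange 0 W 1).foldl (fun d i => d.insert i (0 : Int)) PySem.Dict.empty).items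
      = (PySem.List.pyRange 0 W 1).map (fun i => (i, (0 : Int))) := by
  have := PySem.Dict.items_foldl_insert_fresh (l := PySem.List.pyRange 0 W 1)
    (k := fun i => i) (v := fun _ => (0 : Int)) (d := PySem.Dict.empty)
    (by intro a _; simp) (by simpa using PySem.List.nodup_pyRange_one 0 W)
  simpa using this

theorem bc0_getD (W j : Int) :
    ((PySem.List.pyRange 0 W 1).foldl (fun d i => d.insert i (0 : Int)) PySem.Dict.empty).getD j 0
      = 0 := by
  have h : ∀ (l : List Int) (d : PySem.Dict Int Int), d.getD j 0 = 0 →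
      (l.foldl (fun d i => d.insert i (0 : Int)) d).getD j 0 = 0 := by
    intro l
    induction l with
    | nil => intro d h; simpa using h
    | cons x l ih =>
      intro d h
      simp only [List.foldl_cons]
      refine ih _ ?_
      rw [PySem.Dict.getD_insert]
      split_ifs <;> simp [h]
  exact h _ _ (by simp)

-- ===== VERDICT (by name: the statement is the Claim_ definition above) =====
theorem bit_counter_spec : Claim_equal_bit_counter := by
  intro diag_logs matched _ hpre
  unfold Spec_bit_counter bit_counter bit_counter_alt
  rcases hpre with ⟨hne, _, hent⟩
  set most := ((matched.find? (fun p => p.1 == "most")).map (·.2)).getD "" with hmost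
  set W : Int := (PySem.Str.len ((PySem.List.pyGet? diag_logs 0).getD "") : Int) with hW
  set R := PySem.List.pyRange 0 W 1 with hR
  set bc0 : PySem.Dict Int Int := R.foldl (fun d i => d.insert i 0) PySem.Dict.empty with hbc0
  have hWnn : 0 ≤ W := by simp [hW]
  have hRlen : (R.length : Int) = W := by
    rw [hR, PySem.List.length_pyRange_one]; omega
  have hK : ∀ x : Int, x ∈ R ↔ 0 ≤ x ∧ x < (R.length : Int) := by
    intro x; rw [hRlen, hR, PySem.List.mem_pyRange_one]
  have hhead : (PySem.List.pyGet? diag_logs 0).getD "" = diag_logs.headD "" := by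
    cases diag_logs with
    | nil => simp at hne
    | cons a l => simp
  have hkeys0 : bc0.keys = R := by
    show bc0.items.map (·.1) = R
    rw [hbc0, bc0_items, List.map_map]
    simp [hR, Function.comp_def]
  have hlen : ∀ e ∈ diag_logs, PySem.Str.startswith e most = true →
      (PySem.Str.len e : Int) ≤ (R.length : Int) := by
    intro e he hm
    rw [hRlen, hW, hhead]
    exact_mod_cast (hent e he hm).2
  rcases outer_loop most R 0 hK diag_logs bc0 hkeys0 hlen with ⟨hkeysF, _⟩
  set bcF := diag_logs.foldl (fun d entry =>
      if PySem.Str.startswith entry most then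
        (PySem.List.pyRange 0 ((PySem.Str.len entry : Int)) 1).foldl
          (fun d x => d.insert x (d.getD x 0 + pyIntChar entry x)) d
      else d) bc0 with hbcF
  have hnd : bcF.keys.Nodup := by rw [hkeysF]; exact PySem.List.nodup_pyRange_one 0 W
  rw [PySem.Dict.items_eq_map_keys bcF hnd 0, hkeysF]
  apply List.map_congr_left
  intro j hj
  rcases outer_loop most R j hK diag_logs bc0 hkeys0 hlen with ⟨_, hgF⟩
  rw [← hbcF] at hgF
  have h0j : 0 ≤ j := ((hK j).mp hj).1
  rw [hgF, hbc0, bc0_getD, zero_add,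
      foldl_ite_add (fun e => j < (PySem.Str.len e : Int)) (fun e => pyIntChar e j)
        (diag_logs.filter (fun e => PySem.Str.startswith e most)) 0,
      zero_add]
  refine congrArg _ (congrArg _ (List.map_congr_left ?_))
  intro e _
  by_cases hlt : j < (PySem.Str.len e : Int)
  · rw [if_pos (PySem.List.mem_pyRange_one.mpr ⟨h0j, hlt⟩), if_pos hlt]
  · rw [if_neg (fun hmem => hlt (PySem.List.mem_pyRange_one.mp hmem).2), if_neg hlt]
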